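-- pv_equiv track=rewrite | github.com/shji023/Algorithm | Programmers/모의고사.py | solution
-- ===== SOURCE A (Python) =====
-- def solution(answers):
--     first = [1, 2, 3, 4, 5]
--     second = [2, 1, 2, 3, 2, 4, 2, 5]
--     third = [3, 3, 1, 1, 2, 2, 4, 4, 5, 5]
--     answer_cnt = [0, 0, 0]
--     result = []
--     for i in range(len(answers)):
--         if answers[i] == first[i % 5]:
--             answer_cnt[0] += 1
--         if answers[i] == second[i % 8]:
--             answer_cnt[1] += 1
--         if answers[i] == third[i % 10]:
--             answer_cnt[2] += 1
--     for i in range(len(answer_cnt)):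
--         if max(answer_cnt) == answer_cnt[i]:
--             result.append(i+1)
--     return result
-- ===== SOURCE B (Python) =====
-- def solution(answers):
--     patterns = [[1, 2, 3, 4, 5],
--                 [2, 1, 2, 3, 2, 4, 2, 5],
--                 [3, 3, 1, 1, 2, 2, 4, 4, 5, 5]]
--     # All three patterns are periodic with period dividing 40 = lcm(5, 8, 10),
--     # so one pass suffices to build a histogram keyed by (position mod 40, answer);
--     # each score is then 40 histogram lookups, independent of the answers.
--     hist = {}
--     for i, a in enumerate(answers):
--         key = (i % 40, a)
--         hist[key] = hist.get(key, 0) + 1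
--     scores = [sum(hist.get((r, pat[r % len(pat)]), 0) for r in range(40))
--               for pat in patterns]
--     best = max(scores)
--     return [i + 1 for i, s in enumerate(scores) if s == best]
-- ===== Notes on version B (the rewrite author's own statement) =====
-- stated objective: alternative
-- what changed: B never compares answers against the patterns during the scan: a single pass builds a histogram keyed by (index mod 40, answer) (40 = lcm of the pattern periods), and each pattern's score is then computed from 40 histogram lookups, independent of the input length; A's per-element three-way pattern comparison disappears.
import Mathlib
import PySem

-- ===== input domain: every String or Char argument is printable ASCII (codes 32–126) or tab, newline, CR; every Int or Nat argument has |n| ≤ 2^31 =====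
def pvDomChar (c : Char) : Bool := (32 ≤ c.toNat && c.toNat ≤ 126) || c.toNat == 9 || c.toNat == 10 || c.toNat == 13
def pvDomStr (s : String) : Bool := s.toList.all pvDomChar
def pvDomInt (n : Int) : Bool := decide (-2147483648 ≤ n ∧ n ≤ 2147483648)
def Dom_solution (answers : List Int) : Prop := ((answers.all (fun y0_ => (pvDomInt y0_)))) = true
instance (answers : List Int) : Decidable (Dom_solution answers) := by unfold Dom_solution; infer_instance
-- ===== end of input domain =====

-- B replaces A's per-element three-way pattern comparison by a one-pass histogram keyed by
-- (index mod 40, answer) (40 = lcm of pattern periods); scores are 40 lookups per pattern.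

-- ===== PORT A =====
-- the for-loop over range(len(answers)) as structural recursion carrying the index i and the three counters
def solutionLoop (first second third : List Int) : List Int → Nat → Int × Int × Int → Int × Int × Int
  | [], _, c => c
  | a :: rest, i, (c1, c2, c3) =>
    solutionLoop first second third rest (i + 1)
      ((if a = first.getD (i % 5) 0 then c1 + 1 else c1),
       (if a = second.getD (i % 8) 0 then c2 + 1 else c2),
       (if a = third.getD (i % 10) 0 then c3 + 1 else c3))

def solution (answers : List Int) : List Int :=
  let first : List Int := [1, 2, 3, 4, 5]
  let second : List Int := [2, 1, 2, 3, 2, 4, 2, 5]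
  let third : List Int := [3, 3, 1, 1, 2, 2, 4, 4, 5, 5]
  let c := solutionLoop first second third answers 0 (0, 0, 0)
  let m := max c.1 (max c.2.1 c.2.2)
  (if m = c.1 then [(1 : Int)] else []) ++
  (if m = c.2.1 then [(2 : Int)] else []) ++
  (if m = c.2.2 then [(3 : Int)] else [])

-- ===== PORT B =====
-- one pass over enumerate(answers): hist[(i % 40, a)] = hist.get(key, 0) + 1
def histB (answers : List Int) : PySem.Dict (Int × Int) Int :=
  (PySem.List.enumerate answers 0).foldl
    (fun d q =>
      d.insert (PySem.Int.mod q.1 40, q.2) (d.getD (PySem.Int.mod q.1 40, q.2) 0 + 1))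
    PySem.Dict.empty

-- sum(hist.get((r, pat[r % len(pat)]), 0) for r in range(40)); the index r % len(pat) is always in range
def scoreB (hist : PySem.Dict (Int × Int) Int) (pat : List Int) : Int :=
  (PySem.List.pyRange 0 40 1).foldl
    (fun s r => s + hist.getD (r, PySem.List.pyGetD pat (PySem.Int.mod r (pat.length : Int)) 0) 0) 0

def solution_alt (answers : List Int) : List Int :=
  let patterns : List (List Int) :=
    [[1, 2, 3, 4, 5], [2, 1, 2, 3, 2, 4, 2, 5], [3, 3, 1, 1, 2, 2, 4, 4, 5, 5]]
  let hist := histB answers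
  let scores := patterns.map (fun pat => scoreB hist pat)
  let best := scores.max?.getD 0
  (PySem.List.enumerate scores 0).filterMap
    (fun q => if q.2 = best then some (q.1 + 1) else none)

-- ===== PRECONDITION & SPEC =====
def Spec_solution (answers : List Int) (out : List Int) : Prop := out = solution_alt answers
instance (answers : List Int) (out : List Int) : Decidable (Spec_solution answers out) := by unfold Spec_solution; infer_instance

-- ===== CLAIM (what is proved, stated in full; the proofs are below) =====
def Claim_equal_solution : Prop := ∀ (answers : List Int), Dom_solution answers → Spec_solution answers (solution answers)

-- ===== LEMMAS AND PROOFS =====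

-- proof-side: count of positions with a = pat[(i % m)] along answers, index advancing
def cidx (pat : List Int) (m : Nat) : List Int → Nat → Int
  | [], _ => 0
  | a :: rest, i => (if a = pat.getD (i % m) 0 then 1 else 0) + cidx pat m rest (i + 1)

theorem solutionLoop_eq (f s t : List Int) (answers : List Int) (i : Nat) (c1 c2 c3 : Int) :
    solutionLoop f s t answers i (c1, c2, c3) =
      (c1 + cidx f 5 answers i, c2 + cidx s 8 answers i, c3 + cidx t 10 answers i) := by
  induction answers generalizing i c1 c2 c3 with
  | nil => simp [solutionLoop, cidx]
  | cons a rest ih =>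
    simp only [solutionLoop, cidx, ih, Prod.mk.injEq]
    refine ⟨?_, ?_, ?_⟩ <;> split_ifs <;> ring

theorem foldl_key_insert (l : List (Int × Int)) (d : PySem.Dict (Int × Int) Int) (k : Int × Int) :
    (l.foldl (fun d q =>
        d.insert (PySem.Int.mod q.1 40, q.2) (d.getD (PySem.Int.mod q.1 40, q.2) 0 + 1)) d).getD k 0
      = d.getD k 0 + ((l.countP (fun q => (PySem.Int.mod q.1 40, q.2) == k)) : Int) := by
  induction l generalizing d with
  | nil => simp
  | cons q l ih =>
    rw [List.foldl_cons, ih, PySem.Dict.getD_insert, List.countP_cons]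
    push_cast
    simp only [beq_iff_eq]
    split_ifs with h1 h2 h2
    · rw [h1]; ring
    · exact absurd h1.symm h2
    · exact absurd h2.symm h1
    · ring

theorem histB_getD (answers : List Int) (k : Int × Int) :
    (histB answers).getD k 0 =
      (((PySem.List.enumerate answers 0).countP
          (fun q => (PySem.Int.mod q.1 40, q.2) == k)) : Int) := by
  unfold histB
  rw [foldl_key_insert]
  simp

theorem sum_ind_zero (f : Int → Int) (a j : Int) (R : List Int) (h : j ∉ R) :
    (R.map (fun r => if ((j, a) : Int × Int) = (r, f r) then (1 : Int) else 0)).sum = 0 := by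
  induction R with
  | nil => simp
  | cons r R ih =>
    have hne : j ≠ r := fun hj => h (hj ▸ List.mem_cons_self)
    simp only [List.map_cons, List.sum_cons]
    rw [if_neg (fun hEq => hne (congrArg Prod.fst hEq)),
        ih (fun hm => h (List.mem_cons_of_mem _ hm))]
    ring

theorem sum_ind_one (f : Int → Int) (a j : Int) (R : List Int) (hnd : R.Nodup) (hj : j ∈ R) :
    (R.map (fun r => if ((j, a) : Int × Int) = (r, f r) then (1 : Int) else 0)).sum =
      if a = f j then 1 else 0 := by
  induction R with
  | nil => simp at hj
  | cons r R ih =>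
    simp only [List.map_cons, List.sum_cons]
    rcases List.mem_cons.mp hj with hjr | hjR
    · subst hjr
      rw [sum_ind_zero f a j R (List.nodup_cons.mp hnd).1]
      simp [Prod.ext_iff]
    · have hne : j ≠ r := fun hjr => (List.nodup_cons.mp hnd).1 (hjr ▸ hjR)
      rw [if_neg (fun hEq => hne (congrArg Prod.fst hEq)),
          ih (List.nodup_cons.mp hnd).2 hjR]
      ring

-- the 40 indicator terms for one element (i, a) collapse to "a matches pat at i"
theorem sum_ind (pat : List Int) (hp : 0 < pat.length) (hd : pat.length ∣ 40) (i : Nat) (a : Int) :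
    ((PySem.List.pyRange 0 40 1).map (fun r =>
        (if (PySem.Int.mod (i : Int) 40, a) ==
            (r, PySem.List.pyGetD pat (PySem.Int.mod r (pat.length : Int)) 0) then (1 : Int) else 0))).sum
      = if a = pat.getD (i % pat.length) 0 then 1 else 0 := by
  have hm40 : (0 : Int) < 40 := by norm_num
  have hmp : (0 : Int) < (pat.length : Int) := by exact_mod_cast hp
  have hj : PySem.Int.mod (i : Int) 40 = ((i % 40 : Nat) : Int) := by
    rw [PySem.Int.mod_eq_emod_of_pos hm40]; push_cast; ring
  have hmem : PySem.Int.mod (i : Int) 40 ∈ PySem.List.pyRange 0 40 1 := by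
    rw [hj, PySem.List.mem_pyRange_one]
    constructor
    · positivity
    · exact_mod_cast Nat.mod_lt i (by norm_num)
  have hval : PySem.List.pyGetD pat
      (PySem.Int.mod (PySem.Int.mod (i : Int) 40) (pat.length : Int)) 0 =
      pat.getD (i % pat.length) 0 := by
    rw [hj, PySem.Int.mod_eq_emod_of_pos hmp]
    have hcast : ((i % 40 : Nat) : Int) % (pat.length : Int) = ((i % pat.length : Nat) : Int) := by
      push_cast
      exact Int.emod_emod_of_dvd _ (by exact_mod_cast hd)
    rw [hcast, PySem.List.pyGetD_natCast]
  simp only [beq_iff_eq]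
  rw [sum_ind_one (fun r => PySem.List.pyGetD pat (PySem.Int.mod r (pat.length : Int)) 0)
        a _ _ (PySem.List.nodup_pyRange_one 0 40) hmem, hval]

theorem sum_map_add' (R : List Int) (f g : Int → Int) :
    (R.map (fun r => f r + g r)).sum = (R.map f).sum + (R.map g).sum := by
  induction R with
  | nil => simp
  | cons r R ih => simp only [List.map_cons, List.sum_cons, ih]; ring

theorem csum_eq (pat : List Int) (hp : 0 < pat.length) (hd : pat.length ∣ 40)
    (answers : List Int) : ∀ (i : Nat),
    ((PySem.List.pyRange 0 40 1).map (fun r =>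
        (((PySem.List.enumerate answers (i : Int)).countP
            (fun q => (PySem.Int.mod q.1 40, q.2) ==
              (r, PySem.List.pyGetD pat (PySem.Int.mod r (pat.length : Int)) 0))) : Int))).sum
      = cidx pat pat.length answers i := by
  induction answers with
  | nil => intro i; simp [cidx, PySem.List.enumerate_nil]
  | cons a rest ih =>
    intro i
    simp only [PySem.List.enumerate_cons, List.countP_cons]
    push_cast
    rw [sum_map_add', show ((i : Int) + 1) = (((i + 1 : Nat)) : Int) by push_cast; ring,
        ih (i + 1), sum_ind pat hp hd i a]
    simp only [cidx]
    ring

theorem foldl_add'' (R : List Int) (g : Int → Int) (a : Int) :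
    R.foldl (fun s r => s + g r) a = a + (R.map g).sum := by
  induction R generalizing a with
  | nil => simp
  | cons r R ih => simp only [List.foldl_cons, List.map_cons, List.sum_cons, ih]; ring

theorem scoreB_eq (answers pat : List Int) (hp : 0 < pat.length) (hd : pat.length ∣ 40) :
    scoreB (histB answers) pat = cidx pat pat.length answers 0 := by
  unfold scoreB
  rw [foldl_add'' _ (fun r => (histB answers).getD
        (r, PySem.List.pyGetD pat (PySem.Int.mod r (pat.length : Int)) 0) 0)]
  simp only [histB_getD, zero_add]
  have h := csum_eq pat hp hd answers 0
  simpa using h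

set_option maxRecDepth 8192 in
theorem tailEq (s1 s2 s3 : Int) :
    ((if max s1 (max s2 s3) = s1 then [(1:Int)] else []) ++
     (if max s1 (max s2 s3) = s2 then [(2:Int)] else []) ++
     (if max s1 (max s2 s3) = s3 then [(3:Int)] else [])) =
    List.filterMap (fun x => if x.2 = ([s1, s2, s3].max?).getD 0 then some (x.1 + 1) else none)
      (PySem.List.enumerate [s1, s2, s3] 0) := by
  have hmax : ([s1, s2, s3].max?).getD 0 = max s1 (max s2 s3) := by
    simp [List.max?_cons]
  simp only [PySem.List.enumerate_cons, PySem.List.enumerate_nil, List.filterMap_cons,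
    List.filterMap_nil, hmax]
  norm_num
  clear hmax
  have hm1 : s1 ≤ max s1 (max s2 s3) := le_max_left _ _
  have hm2 : s2 ≤ max s1 (max s2 s3) := by simp
  have hm3 : s3 ≤ max s1 (max s2 s3) := by simp
  have hmem : max s1 (max s2 s3) = s1 ∨ max s1 (max s2 s3) = s2 ∨ max s1 (max s2 s3) = s3 := by
    rcases le_total s1 (max s2 s3) with h | h <;> rcases le_total s2 s3 with h' | h' <;>
      simp [max_def] <;> split_ifs <;> omega
  generalize max s1 (max s2 s3) = m at hm1 hm2 hm3 hmem ⊢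
  split_ifs <;> first | rfl | (exfalso; omega)

-- ===== VERDICT (by name: the statement is the Claim_ definition above) =====
theorem solution_spec : Claim_equal_solution := by
  intro answers _
  unfold Spec_solution solution solution_alt
  simp only
  rw [solutionLoop_eq]
  rw [List.map_cons, List.map_cons, List.map_cons, List.map_nil]
  rw [scoreB_eq answers [1,2,3,4,5] (by simp) (by simp),
      scoreB_eq answers [2,1,2,3,2,4,2,5] (by simp) (by simp),
      scoreB_eq answers [3,3,1,1,2,2,4,4,5,5] (by simp) (by simp)]
  simp only [List.length_cons, List.length_nil, Nat.reduceAdd, zero_add]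
  exact tailEq _ _ _
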